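-- pv_equiv track=rewrite | github.com/Zjlong-1/2024fall-cs101 | Previous practices/le腐烂的橘子.py | f
-- ===== SOURCE A (Python) =====
-- from collections import deque
--
-- def f(grid):
--     directions = [(0, 1), (0, -1), (1, 0), (-1, 0)]
--     n, m = len(grid), len(grid[0])
--
--     def bfs(x, y):
--         q = deque()
--         inq = set()
--         q.append((0, x, y))
--         inq.add((x, y))
--         while q:
--             step, i, j = q.popleft()
--             if grid[i][j] == 2:
--                 return step
--             for dx, dy in directions:
--                 nx, ny = dx + i, dy + j
--                 if 0 <= nx < n and 0 <= ny < m and grid[nx][ny] != 0 and (nx, ny) not in inq: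
--                     inq.add((nx, ny))
--                     q.append((step + 1, nx, ny))
--         return -1
--
--     def solve():
--         ans = 0
--         for i in range(n):
--             for j in range(m):
--                 if grid[i][j] == 1:
--                     k = bfs(i, j)
--                     if k == -1:
--                         return -1
--                     ans = max(ans, k)
--         return ans
--
--     return solve()
-- ===== SOURCE B (Python) =====
-- def f(grid):
--     n, m = len(grid), len(grid[0])
--     dist = {}
--     for i in range(n):
--         for j in range(m):
--             if grid[i][j] == 2:
--                 dist[(i, j)] = 0
--     frontier = list(dist)
--     k = 0
--     while frontier:
--         k += 1
--         nxt = []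
--         for (i, j) in frontier:
--             for (di, dj) in ((0, 1), (0, -1), (1, 0), (-1, 0)):
--                 c = (i + di, j + dj)
--                 if 0 <= c[0] < n and 0 <= c[1] < m and grid[c[0]][c[1]] != 0 and c not in dist:
--                     dist[c] = k
--                     nxt.append(c)
--         frontier = nxt
--     ans = 0
--     for i in range(n):
--         for j in range(m):
--             if grid[i][j] == 1:
--                 if (i, j) not in dist:
--                     return -1
--                 ans = max(ans, dist[(i, j)])
--     return ans
-- ===== Notes on version B (the rewrite author's own statement) =====
-- stated objective: alternative
-- what changed: A runs a fresh queue-based BFS from every fresh orange to find its nearest rotten one; B runs a single multi-source level-by-level BFS from all rotten oranges at once and then reads each fresh orange's distance out of the resulting dict (asymptotically O(n*m) vs A's worst-case O((n*m)^2), though not measurably faster on the random timing inputs).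
-- outside the precondition, e.g. on f([]): A raises IndexError, B raises IndexError; on f([[1, 0], [0]]): A returns -1, B raises IndexError
import Mathlib
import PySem

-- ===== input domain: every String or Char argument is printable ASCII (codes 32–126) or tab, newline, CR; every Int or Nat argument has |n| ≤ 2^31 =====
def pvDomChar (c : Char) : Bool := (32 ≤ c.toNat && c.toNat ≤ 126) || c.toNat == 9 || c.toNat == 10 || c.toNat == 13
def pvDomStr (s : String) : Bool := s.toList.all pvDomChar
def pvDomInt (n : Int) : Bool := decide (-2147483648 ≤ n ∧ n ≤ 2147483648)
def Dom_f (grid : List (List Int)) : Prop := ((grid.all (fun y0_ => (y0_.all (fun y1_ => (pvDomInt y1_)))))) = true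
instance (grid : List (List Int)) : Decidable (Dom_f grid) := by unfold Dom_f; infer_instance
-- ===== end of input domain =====

-- B replaces A's per-fresh-cell BFS (a fresh queue search for every '1') by ONE multi-source
-- level-by-level BFS from all '2' cells, read back per fresh cell (objective: alternative).

-- shared helpers (both Pythons use the same direction list and the same grid access grid[i][j])
def dirs : List (Int × Int) := [(0, 1), (0, -1), (1, 0), (-1, 0)]

def cellv (grid : List (List Int)) (i j : Int) : Int :=
  (PySem.List.pyGet? ((PySem.List.pyGet? grid i).getD []) j).getD 0

-- ===== PORT A =====
-- loop body of bfs's 'for dx, dy in directions'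
def bodyA (grid : List (List Int)) (n m step i j : Int)
    (st : List (Int × Int × Int) × PySem.Set (Int × Int)) (d : Int × Int) :
    List (Int × Int × Int) × PySem.Set (Int × Int) :=
  let nx := d.1 + i
  let ny := d.2 + j
  if 0 ≤ nx ∧ nx < n ∧ 0 ≤ ny ∧ ny < m ∧ cellv grid nx ny ≠ 0 ∧ ¬ ((nx, ny) ∈ st.2) then
    (st.1 ++ [(step + 1, nx, ny)], PySem.Set.add st.2 (nx, ny))
  else st

-- inner 'for dx, dy in directions' of bfs
def expandA (grid : List (List Int)) (n m step i j : Int)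
    (st : List (Int × Int × Int) × PySem.Set (Int × Int)) :
    List (Int × Int × Int) × PySem.Set (Int × Int) :=
  dirs.foldl (bodyA grid n m step i j) st

-- 'while q:' of bfs (fuel bounds the number of iterations; never reached on admitted inputs)
def bfsLoopA (grid : List (List Int)) (n m : Int) :
    Nat → List (Int × Int × Int) → PySem.Set (Int × Int) → Int
  | 0, _, _ => -1
  | fuel + 1, q, inq =>
    match q with
    | [] => -1
    | (step, i, j) :: rest =>
      if cellv grid i j = 2 then step
      else
        let st := expandA grid n m step i j (rest, inq)
        bfsLoopA grid n m fuel st.1 st.2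

def bfsA (grid : List (List Int)) (n m x y : Int) : Int :=
  bfsLoopA grid n m (2 * (n.toNat * m.toNat) + 2) [(0, x, y)] (PySem.Set.ofList [(x, y)])

-- 'for j in range(m)' of solve, with early return -1 as none
def innerA (grid : List (List Int)) (n m i : Int) : List Int → Int → Option Int
  | [], ans => some ans
  | j :: js, ans =>
    if cellv grid i j = 1 then
      let k := bfsA grid n m i j
      if k = -1 then none else innerA grid n m i js (max ans k)
    else innerA grid n m i js ans

def outerA (grid : List (List Int)) (n m : Int) : List Int → Int → Option Int
  | [], ans => some ans
  | i :: is, ans =>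
    match innerA grid n m i (PySem.List.pyRange 0 m 1) ans with
    | none => none
    | some a => outerA grid n m is a

def f (grid : List (List Int)) : Int :=
  let n : Int := grid.length
  let m : Int := ((PySem.List.pyGet? grid 0).getD []).length
  match outerA grid n m (PySem.List.pyRange 0 n 1) 0 with
  | none => -1
  | some a => a

-- ===== PORT B =====
-- 'dist[(i,j)] = 0 for every rotten cell' (the two initialisation loops)
def initB (grid : List (List Int)) (n m : Int) : PySem.Dict (Int × Int) Int :=
  (PySem.List.pyRange 0 n 1).foldl (fun d i =>
    (PySem.List.pyRange 0 m 1).foldl (fun d j =>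
      if cellv grid i j = 2 then d.insert (i, j) 0 else d) d) PySem.Dict.empty

-- loop body of 'for (di, dj) in …'
def bodyB (grid : List (List Int)) (n m k : Int) (c : Int × Int)
    (st : PySem.Dict (Int × Int) Int × List (Int × Int)) (d : Int × Int) :
    PySem.Dict (Int × Int) Int × List (Int × Int) :=
  let c' := (c.1 + d.1, c.2 + d.2)
  if 0 ≤ c'.1 ∧ c'.1 < n ∧ 0 ≤ c'.2 ∧ c'.2 < m ∧ cellv grid c'.1 c'.2 ≠ 0 ∧
      (st.1.get? c').isNone then
    (st.1.insert c' k, st.2 ++ [c'])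
  else st

-- 'for (di, dj) in …' for one frontier cell
def stepCellB (grid : List (List Int)) (n m k : Int)
    (st : PySem.Dict (Int × Int) Int × List (Int × Int)) (c : Int × Int) :
    PySem.Dict (Int × Int) Int × List (Int × Int) :=
  dirs.foldl (bodyB grid n m k c) st

-- 'while frontier:' (fuel bounds the number of rounds; never reached on admitted inputs)
def loopB (grid : List (List Int)) (n m : Int) :
    Nat → Int → PySem.Dict (Int × Int) Int → List (Int × Int) → PySem.Dict (Int × Int) Int
  | 0, _, dist, _ => dist
  | fuel + 1, k, dist, frontier =>
    match frontier with
    | [] => dist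
    | _ :: _ =>
      let st := frontier.foldl (stepCellB grid n m (k + 1)) (dist, [])
      loopB grid n m fuel (k + 1) st.1 st.2

def innerB (grid : List (List Int)) (dist : PySem.Dict (Int × Int) Int) (i : Int) :
    List Int → Int → Option Int
  | [], ans => some ans
  | j :: js, ans =>
    if cellv grid i j = 1 then
      match dist.get? (i, j) with
      | none => none
      | some v => innerB grid dist i js (max ans v)
    else innerB grid dist i js ans

def outerB (grid : List (List Int)) (dist : PySem.Dict (Int × Int) Int) (m : Int) :
    List Int → Int → Option Int
  | [], ans => some ans
  | i :: is, ans =>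
    match innerB grid dist i (PySem.List.pyRange 0 m 1) ans with
    | none => none
    | some a => outerB grid dist m is a

def f_alt (grid : List (List Int)) : Int :=
  let n : Int := grid.length
  let m : Int := ((PySem.List.pyGet? grid 0).getD []).length
  let dist0 := initB grid n m
  let dist := loopB grid n m (n.toNat * m.toNat + 2) 0 dist0 dist0.keys
  match outerB grid dist m (PySem.List.pyRange 0 n 1) 0 with
  | none => -1
  | some a => a

-- ===== PRECONDITION & SPEC =====
-- Pre_ excludes the empty grid (A's len(grid[0]) raises IndexError) and grids with a row shorter
-- than the first one: on those A's full scan raises IndexError, except when it happens to return -1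
-- before reaching the short row, where B's natural up-front scan still raises.
def Pre_f (grid : List (List Int)) : Prop :=
  grid ≠ [] ∧ ∀ r ∈ grid, (grid.headI).length ≤ r.length
instance (grid : List (List Int)) : Decidable (Pre_f grid) := by unfold Pre_f; infer_instance

def pvWitness_f : List (List Int) := [[2, 1, 1], [1, 1, 0], [0, 1, 1]]

def Spec_f (grid : List (List Int)) (out : Int) : Prop := out = f_alt grid
instance (grid : List (List Int)) (out : Int) : Decidable (Spec_f grid out) := by
  unfold Spec_f; infer_instance

-- ===== CLAIM (what is proved, stated in full; the proofs are below) =====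
def Claim_equal_f : Prop := ∀ (grid : List (List Int)), Dom_f grid → Pre_f grid → Spec_f grid (f grid)

-- ===== LEMMAS AND PROOFS =====

-- the passable cells (in bounds, nonzero) and the rotten sources (in bounds, value 2)
def pass (grid : List (List Int)) (n m : Int) (c : Int × Int) : Prop :=
  0 ≤ c.1 ∧ c.1 < n ∧ 0 ≤ c.2 ∧ c.2 < m ∧ cellv grid c.1 c.2 ≠ 0

def src (grid : List (List Int)) (n m : Int) (c : Int × Int) : Prop :=
  0 ≤ c.1 ∧ c.1 < n ∧ 0 ≤ c.2 ∧ c.2 < m ∧ cellv grid c.1 c.2 = 2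

def nbL (c : Int × Int) : List (Int × Int) := dirs.map (fun d => (d.1 + c.1, d.2 + c.2))

-- walks of a given length through passable cells
inductive Walk (grid : List (List Int)) (n m : Int) : Nat → (Int × Int) → (Int × Int) → Prop
  | nil (c : Int × Int) : pass grid n m c → Walk grid n m 0 c c
  | snoc {k : Nat} {a b : Int × Int} (c : Int × Int) :
      Walk grid n m k a b → c ∈ nbL b → pass grid n m c → Walk grid n m (k + 1) a c

-- exists a walk of length k from some source to c
def RS (grid : List (List Int)) (n m : Int) (c : Int × Int) (k : Nat) : Prop :=
  ∃ t, src grid n m t ∧ Walk grid n m k t c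

-- k is the multi-source BFS distance of c
def RSmin (grid : List (List Int)) (n m : Int) (c : Int × Int) (k : Nat) : Prop :=
  RS grid n m c k ∧ ∀ j, RS grid n m c j → k ≤ j

-- minimal walk length between two cells
def dmin (grid : List (List Int)) (n m : Int) (s c : Int × Int) (k : Nat) : Prop :=
  Walk grid n m k s c ∧ ∀ j, Walk grid n m j s c → k ≤ j


lemma pass_of_src {g : List (List Int)} {n m : Int} {c : Int × Int}
    (h : src g n m c) : pass g n m c := by
  obtain ⟨h1, h2, h3, h4, h5⟩ := h
  exact ⟨h1, h2, h3, h4, by rw [h5]; decide⟩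

lemma walk_pass_right {g : List (List Int)} {n m : Int} {k : Nat} {a b : Int × Int}
    (h : Walk g n m k a b) : pass g n m b := by
  cases h with
  | nil _ hp => exact hp
  | snoc _ _ _ hp => exact hp

lemma walk_zero_eq {g : List (List Int)} {n m : Int} {a b : Int × Int}
    (h : Walk g n m 0 a b) : a = b := by
  cases h; rfl

lemma mem_nbL_symm {x c : Int × Int} (h : x ∈ nbL c) : c ∈ nbL x := by
  obtain ⟨x1, x2⟩ := x
  obtain ⟨c1, c2⟩ := c
  simp only [nbL, dirs, List.map_cons, List.map_nil, List.mem_cons, List.not_mem_nil,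
    or_false, Prod.mk.injEq] at h ⊢
  rcases h with h | h | h | h
  · exact Or.inr (Or.inl (by omega))
  · exact Or.inl (by omega)
  · exact Or.inr (Or.inr (Or.inr (by omega)))
  · exact Or.inr (Or.inr (Or.inl (by omega)))

lemma walk_cons {g : List (List Int)} {n m : Int} {k : Nat} {a b c : Int × Int}
    (h1 : pass g n m a) (h2 : b ∈ nbL a) (hw : Walk g n m k b c) : Walk g n m (k + 1) a c := by
  revert h2
  induction hw with
  | nil d hp => intro h2; exact Walk.snoc d (Walk.nil a h1) h2 hp
  | snoc d w hnb hp ih => intro h2; exact Walk.snoc d (ih h2) hnb hp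

lemma walk_symm {g : List (List Int)} {n m : Int} {k : Nat} {a b : Int × Int}
    (h : Walk g n m k a b) : Walk g n m k b a := by
  induction h with
  | nil c hp => exact Walk.nil c hp
  | snoc c w hnb hp ih => exact walk_cons hp (mem_nbL_symm hnb) ih

lemma nat_exists_min {P : Nat → Prop} {k : Nat} (h : P k) :
    ∃ k0, P k0 ∧ ∀ j, P j → k0 ≤ j := by
  haveI := Classical.decPred P
  exact ⟨Nat.find ⟨k, h⟩, Nat.find_spec ⟨k, h⟩, fun j hj => Nat.find_le hj⟩

lemma RSmin_unique {g : List (List Int)} {n m : Int} {c : Int × Int} {k k' : Nat}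
    (h : RSmin g n m c k) (h' : RSmin g n m c k') : k = k' :=
  le_antisymm (h.2 _ h'.1) (h'.2 _ h.1)

lemma RSmin_zero_iff {g : List (List Int)} {n m : Int} {c : Int × Int} :
    RSmin g n m c 0 ↔ src g n m c := by
  constructor
  · rintro ⟨⟨t, hs, hw⟩, -⟩
    rwa [walk_zero_eq hw] at hs
  · intro hs
    exact ⟨⟨c, hs, Walk.nil c (pass_of_src hs)⟩, fun j _ => Nat.zero_le j⟩

lemma RSmin_descend {g : List (List Int)} {n m : Int} {c : Int × Int} {k : Nat}
    (h : RSmin g n m c (k + 1)) : ∃ b, RSmin g n m b k ∧ c ∈ nbL b ∧ pass g n m c := by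
  obtain ⟨⟨t, hs, hw⟩, hmin⟩ := h
  cases hw with
  | snoc _ w hnb hp =>
    rename_i b
    have hRS : RS g n m b k := ⟨t, hs, w⟩
    obtain ⟨j, hj, hjmin⟩ := nat_exists_min hRS
    have hjk : j = k := by
      have h1 : k + 1 ≤ j + 1 := by
        obtain ⟨t', hs', w'⟩ := hj
        exact hmin (j + 1) ⟨t', hs', Walk.snoc c w' hnb hp⟩
      have h2 : j ≤ k := hjmin k ⟨t, hs, w⟩
      omega
    exact ⟨b, by rw [← hjk]; exact ⟨hj, hjmin⟩, hnb, hp⟩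

lemma RSmin_exists_level {g : List (List Int)} {n m : Int} {k : Nat} :
    ∀ {c : Int × Int}, RSmin g n m c k → ∀ j ≤ k, ∃ b, RSmin g n m b j := by
  induction k with
  | zero =>
    intro c h j hj
    interval_cases j
    exact ⟨c, h⟩
  | succ k ih =>
    intro c h j hj
    rcases Nat.eq_or_lt_of_le hj with rfl | hlt
    · exact ⟨c, h⟩
    · obtain ⟨b, hb, -, -⟩ := RSmin_descend h
      exact ih hb j (by omega)

lemma card_bound {n m : Int} {D : List (Int × Int)} (hd : D.Nodup)
    (hp : ∀ c ∈ D, 0 ≤ c.1 ∧ c.1 < n ∧ 0 ≤ c.2 ∧ c.2 < m) :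
    D.length ≤ n.toNat * m.toNat := by
  classical
  have hsub : D.toFinset ⊆ Finset.Ico (0 : Int) n ×ˢ Finset.Ico (0 : Int) m := by
    intro c hc
    rw [List.mem_toFinset] at hc
    obtain ⟨h1, h2, h3, h4⟩ := hp c hc
    simp only [Finset.mem_product, Finset.mem_Ico]
    exact ⟨⟨h1, h2⟩, ⟨h3, h4⟩⟩
  have := Finset.card_le_card hsub
  rw [List.toFinset_card_of_nodup hd] at this
  simpa [Int.toNat_of_nonneg] using this


lemma foldA_spec (g : List (List Int)) (n m : Int) (t : Nat) (i j : Int) :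
    ∀ (L : List (Int × Int)) (q0 : List (Int × Int × Int)) (D0 : List (Int × Int)),
      D0.Nodup →
      ∃ new : List (Int × Int),
        (L.foldl (bodyA g n m (t : Int) i j) (q0, D0)) =
          (q0 ++ new.map (fun x => ((t : Int) + 1, x.1, x.2)), D0 ++ new) ∧
        new.Nodup ∧
        (∀ x ∈ new, x ∈ L.map (fun d => (d.1 + i, d.2 + j)) ∧ pass g n m x ∧ x ∉ D0) ∧
        (∀ x ∈ L.map (fun d => (d.1 + i, d.2 + j)), pass g n m x → x ∈ D0 ++ new) := by
  intro L
  induction L with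
  | nil =>
    intro q0 D0 _
    exact ⟨[], by simp, by simp, by simp, by simp⟩
  | cons d L' ih =>
    intro q0 D0 hnd
    rw [List.foldl_cons]
    by_cases hguard : pass g n m (d.1 + i, d.2 + j) ∧ (d.1 + i, d.2 + j) ∉ D0
    · have hbody : bodyA g n m (t : Int) i j (q0, D0) d =
          (q0 ++ [((t : Int) + 1, d.1 + i, d.2 + j)], D0 ++ [(d.1 + i, d.2 + j)]) := by
        simp only [bodyA]
        rw [if_pos]
        · rw [PySem.Set.add_of_not_mem hguard.2]
        · obtain ⟨⟨p1, p2, p3, p4, p5⟩, p6⟩ := hguard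
          exact ⟨p1, p2, p3, p4, p5, p6⟩
      rw [hbody]
      obtain ⟨new', heq, hnd', hprops, hcov⟩ :=
        ih (q0 ++ [((t : Int) + 1, d.1 + i, d.2 + j)]) (D0 ++ [(d.1 + i, d.2 + j)])
          (by
            rw [List.nodup_append]
            refine ⟨hnd, List.nodup_singleton _, ?_⟩
            intro a ha b hb
            rw [List.mem_singleton] at hb
            subst hb
            exact fun h => hguard.2 (h ▸ ha))
      refine ⟨(d.1 + i, d.2 + j) :: new', ?_, ?_, ?_, ?_⟩
      · rw [heq]
        simp [List.append_assoc]
      · refine List.Nodup.cons ?_ hnd'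
        intro hmem
        exact (hprops _ hmem).2.2 (by simp)
      · intro x hx
        rcases List.mem_cons.mp hx with rfl | hx'
        · exact ⟨by rw [List.map_cons]; exact List.mem_cons_self, hguard.1, hguard.2⟩
        · obtain ⟨h1, h2, h3⟩ := hprops x hx'
          exact ⟨by rw [List.map_cons]; exact List.mem_cons_of_mem _ h1, h2,
            fun hc => h3 (by simp [hc])⟩
      · intro x hx hpx
        rw [List.map_cons] at hx
        rcases List.mem_cons.mp hx with rfl | hx'
        · simp
        · have := hcov x hx' hpx
          simpa [List.append_assoc] using this
    · have hbody : bodyA g n m (t : Int) i j (q0, D0) d = (q0, D0) := by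
        simp only [bodyA]
        rw [if_neg]
        intro ⟨p1, p2, p3, p4, p5, p6⟩
        exact hguard ⟨⟨p1, p2, p3, p4, p5⟩, p6⟩
      rw [hbody]
      obtain ⟨new', heq, hnd', hprops, hcov⟩ := ih q0 D0 hnd
      refine ⟨new', heq, hnd', ?_, ?_⟩
      · intro x hx
        obtain ⟨h1, h2, h3⟩ := hprops x hx
        exact ⟨by simp [h1], h2, h3⟩
      · intro x hx hpx
        rw [List.map_cons] at hx
        rcases List.mem_cons.mp hx with rfl | hx'
        · by_cases hmem : (d.1 + i, d.2 + j) ∈ D0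
          · simp [hmem]
          · exact absurd ⟨hpx, hmem⟩ hguard
        · exact hcov x hx' hpx

-- the queue-BFS invariant of A's bfs: q = qa ++ qb, qa the unexpanded remainder of level t,
-- qb the discovered part of level t+1, D the ever-enqueued set
def INV (g : List (List Int)) (n m : Int) (s : Int × Int) (t : Nat)
    (qa qb : List (Int × Int × Int)) (D : List (Int × Int)) : Prop :=
  (∀ e ∈ qa, e.1 = (t : Int) ∧ dmin g n m s e.2 t) ∧
  (∀ e ∈ qb, e.1 = (t : Int) + 1 ∧ dmin g n m s e.2 (t + 1)) ∧
  D.Nodup ∧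
  (∀ c ∈ D, pass g n m c) ∧
  (∀ e ∈ qa ++ qb, e.2 ∈ D) ∧
  (∀ c, c ∈ D ↔ ((∃ k ≤ t, dmin g n m s c k) ∨ ∃ e ∈ qb, c = e.2)) ∧
  (∀ c ∈ D, (∀ e ∈ qa ++ qb, c ≠ e.2) → cellv g c.1 c.2 ≠ 2 ∧
    ∀ x ∈ nbL c, pass g n m x → x ∈ D)

def specOutA (g : List (List Int)) (n m : Int) (s : Int × Int) (r : Int) : Prop :=
  (∃ k, RSmin g n m s k ∧ r = (k : Int)) ∨ ((∀ k, ¬ RS g n m s k) ∧ r = -1)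

lemma dmin_unique {g : List (List Int)} {n m : Int} {s c : Int × Int} {k k' : Nat}
    (h : dmin g n m s c k) (h' : dmin g n m s c k') : k = k' :=
  le_antisymm (h.2 _ h'.1) (h'.2 _ h.1)

lemma INV_norm {g : List (List Int)} {n m : Int} {s : Int × Int} {t : Nat}
    {qb : List (Int × Int × Int)} {D : List (Int × Int)}
    (h : INV g n m s t [] qb D) : INV g n m s (t + 1) qb [] D := by
  obtain ⟨h1, h2, h3, h4, h5, h6, h7⟩ := h
  refine ⟨?_, by simp, h3, h4, by simpa using h5, ?_, ?_⟩
  · intro e he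
    obtain ⟨he1, he2⟩ := h2 e he
    exact ⟨by rw [he1]; push_cast; ring, he2⟩
  · intro c
    rw [h6 c]
    constructor
    · rintro (⟨k, hk, hd⟩ | ⟨e, he, rfl⟩)
      · exact Or.inl ⟨k, by omega, hd⟩
      · exact Or.inl ⟨t + 1, le_refl _, (h2 e he).2⟩
    · rintro (⟨k, hk, hd⟩ | ⟨e, he, _⟩)
      · rcases Nat.lt_or_ge k (t + 1) with hlt | hge
        · exact Or.inl ⟨k, by omega, hd⟩
        · -- k = t + 1 : c is at distance t+1; show c is in qb
          have hk1 : k = t + 1 := by omega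
          subst hk1
          -- c has a neighbour b at distance t; b is expanded, so c ∈ D, use h6 again
          obtain ⟨hw, hmin⟩ := hd
          cases hw with
          | snoc _ w hnb hp =>
            rename_i b
            have hbd : dmin g n m s b t := by
              obtain ⟨jb, hjb, hjbmin⟩ := nat_exists_min (P := fun j => Walk g n m j s b) w
              have : jb = t := by
                have h1' : t + 1 ≤ jb + 1 := hmin _ (Walk.snoc _ hjb hnb hp)
                have h2' : jb ≤ t := hjbmin _ w
                omega
              rw [← this]; exact ⟨hjb, hjbmin⟩
            have hbD : b ∈ D := (h6 b).mpr (Or.inl ⟨t, le_refl _, hbd⟩)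
            have hbnq : ∀ e ∈ ([] : List (Int × Int × Int)) ++ qb, b ≠ e.2 := by
              intro e he hbe
              have hd2 := (h2 e (by simpa using he)).2
              rw [← hbe] at hd2
              have := dmin_unique hbd hd2
              omega
            have hbexp := h7 b hbD hbnq
            exact (h6 c).mp (hbexp.2 c hnb hp)
      · exact absurd he (List.not_mem_nil)
  · intro c hc hnq
    exact h7 c hc (by simpa using hnq)


lemma walk_closed {g : List (List Int)} {n m : Int} {D : List (Int × Int)}
    (hclosed : ∀ c ∈ D, ∀ x ∈ nbL c, pass g n m x → x ∈ D) :
    ∀ {k : Nat} {a c : Int × Int}, Walk g n m k a c → a ∈ D → c ∈ D := by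
  intro k a c w
  induction w with
  | nil _ _ => exact id
  | snoc c w hnb hp ih => exact fun ha => hclosed _ (ih ha) c hnb hp

lemma pass_bounds {g : List (List Int)} {n m : Int} {c : Int × Int}
    (h : pass g n m c) : 0 ≤ c.1 ∧ c.1 < n ∧ 0 ≤ c.2 ∧ c.2 < m :=
  ⟨h.1, h.2.1, h.2.2.1, h.2.2.2.1⟩

lemma loopA_step (g : List (List Int)) (n m : Int) (s : Int × Int) (fuel : Nat)
    (ih : ∀ t qa qb (D : List (Int × Int)), INV g n m s t qa qb D →
      (qa ++ qb).length + 2 * (n.toNat * m.toNat - D.length) < fuel →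
      specOutA g n m s (bfsLoopA g n m fuel (qa ++ qb) D))
    (t : Nat) (e : Int × Int × Int) (qa' qb : List (Int × Int × Int)) (D : List (Int × Int))
    (hI : INV g n m s t (e :: qa') qb D)
    (hf : ((e :: qa') ++ qb).length + 2 * (n.toNat * m.toNat - D.length) < fuel + 1) :
    specOutA g n m s (bfsLoopA g n m (fuel + 1) ((e :: qa') ++ qb) D) := by
  obtain ⟨st, ci, cj⟩ := e
  obtain ⟨h1, h2, h3, h4, h5, h6, h7⟩ := hI
  obtain ⟨hst, hd⟩ := h1 (st, ci, cj) (List.mem_cons_self)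
  have hcD : (ci, cj) ∈ D := h5 (st, ci, cj) (List.mem_cons_self)
  have hcpass : pass g n m (ci, cj) := h4 _ hcD
  subst hst
  rw [List.cons_append]
  simp only [bfsLoopA]
  by_cases h2cell : cellv g ci cj = 2
  · rw [if_pos h2cell]
    left
    refine ⟨t, ⟨⟨(ci, cj), ⟨hcpass.1, hcpass.2.1, hcpass.2.2.1, hcpass.2.2.2.1, h2cell⟩,
      walk_symm hd.1⟩, ?_⟩, rfl⟩
    intro j hRS
    by_contra hlt
    rw [Nat.not_le] at hlt
    obtain ⟨t', hs', w'⟩ := hRS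
    have w'' := walk_symm w'
    obtain ⟨j', hj', hj'min⟩ := nat_exists_min (P := fun j => Walk g n m j s t') w''
    have hj'le : j' ≤ j := hj'min _ w''
    have ht'D : t' ∈ D := (h6 t').mpr (Or.inl ⟨j', by omega, ⟨hj', hj'min⟩⟩)
    have ht'nq : ∀ e' ∈ ((t : Int), ci, cj) :: qa' ++ qb, t' ≠ e'.2 := by
      intro e' he' hte
      rcases List.mem_append.mp he' with hqa | hqb
      · have := (h1 e' hqa).2
        rw [← hte] at this
        have := dmin_unique ⟨hj', hj'min⟩ this
        omega
      · have := (h2 e' hqb).2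
        rw [← hte] at this
        have := dmin_unique ⟨hj', hj'min⟩ this
        omega
    exact (h7 t' ht'D ht'nq).1 hs'.2.2.2.2
  · rw [if_neg h2cell]
    have hexp : expandA g n m (↑t) (ci) (cj) (qa' ++ qb, D) =
        dirs.foldl (bodyA g n m (↑t) ci cj) (qa' ++ qb, D) := rfl
    obtain ⟨new, heq, hndnew, hprops, hcov⟩ :=
      foldA_spec g n m t ci cj dirs (qa' ++ qb) D h3
    rw [hexp, heq]
    have hnbLc : nbL (ci, cj) = dirs.map (fun d => (d.1 + ci, d.2 + cj)) := rfl
    -- new distances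
    have hnewd : ∀ x ∈ new, dmin g n m s x (t + 1) := by
      intro x hx
      obtain ⟨hxnb, hxpass, hxD⟩ := hprops x hx
      refine ⟨Walk.snoc x hd.1 (by rw [hnbLc]; exact hxnb) hxpass, ?_⟩
      intro jw hw
      by_contra hc
      rw [Nat.not_le] at hc
      obtain ⟨j', hj', hj'min⟩ := nat_exists_min (P := fun j => Walk g n m j s x) hw
      exact hxD ((h6 x).mpr (Or.inl ⟨j', by
        have := hj'min _ hw
        omega, ⟨hj', hj'min⟩⟩))
    -- the new D is still within bounds
    have hD'pass : ∀ c ∈ D ++ new, pass g n m c := by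
      intro c hc
      rcases List.mem_append.mp hc with h | h
      · exact h4 c h
      · exact (hprops c h).2.1
    have hD'nodup : (D ++ new).Nodup := by
      rw [List.nodup_append]
      exact ⟨h3, hndnew, fun a ha b hb hab => (hprops b hb).2.2 (hab ▸ ha)⟩
    have hD'le : (D ++ new).length ≤ n.toNat * m.toNat :=
      card_bound hD'nodup (fun c hc => pass_bounds (hD'pass c hc))
    have hInew : INV g n m s t qa' (qb ++ new.map (fun x => ((t : Int) + 1, x.1, x.2)))
        (D ++ new) := by
      refine ⟨fun e' he' => h1 e' (List.mem_cons_of_mem _ he'), ?_, hD'nodup, hD'pass, ?_, ?_, ?_⟩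
      · intro e' he'
        rcases List.mem_append.mp he' with h | h
        · exact h2 e' h
        · obtain ⟨x, hx, rfl⟩ := List.mem_map.mp h
          exact ⟨rfl, hnewd x hx⟩
      · intro e' he'
        rcases List.mem_append.mp he' with h | h
        · exact List.mem_append_left _ (h5 e' (List.mem_cons_of_mem _ (List.mem_append_left _ h)))
        · rcases List.mem_append.mp h with h | h
          · exact List.mem_append_left _ (h5 e' (List.mem_cons_of_mem _ (List.mem_append_right _ h)))
          · obtain ⟨x, hx, rfl⟩ := List.mem_map.mp h
            exact List.mem_append_right _ hx
      · intro c
        constructor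
        · intro hc
          rcases List.mem_append.mp hc with h | h
          · rcases (h6 c).mp h with h' | ⟨e', he', rfl⟩
            · exact Or.inl h'
            · exact Or.inr ⟨e', List.mem_append_left _ he', rfl⟩
          · exact Or.inr ⟨((t : Int) + 1, c.1, c.2), List.mem_append_right _
              (List.mem_map.mpr ⟨c, h, rfl⟩), rfl⟩
        · rintro (h | ⟨e', he', rfl⟩)
          · exact List.mem_append_left _ ((h6 c).mpr (Or.inl h))
          · rcases List.mem_append.mp he' with h | h
            · exact List.mem_append_left _ ((h6 _).mpr (Or.inr ⟨e', h, rfl⟩))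
            · obtain ⟨x, hx, rfl⟩ := List.mem_map.mp h
              exact List.mem_append_right _ hx
      · intro c hc hnq
        rcases List.mem_append.mp hc with hcind | hcinnew
        · by_cases hcc : c = (ci, cj)
          · subst hcc
            refine ⟨h2cell, ?_⟩
            intro x hx hpx
            exact hcov x (by rwa [hnbLc] at hx) hpx
          · have hold := h7 c hcind (by
              intro e' he' hce
              rcases List.mem_cons.mp he' with rfl | he''
              · exact hcc (by rw [hce])
              · exact hnq e' (by
                  rcases List.mem_append.mp he'' with h | h
                  · exact List.mem_append_left _ h
                  · exact List.mem_append_right _ (List.mem_append_left _ h)) hce)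
            exact ⟨hold.1, fun x hx hpx => List.mem_append_left _ (hold.2 x hx hpx)⟩
        · exact absurd rfl (hnq ((t : Int) + 1, c.1, c.2)
            (List.mem_append_right _ (List.mem_append_right _
              (List.mem_map.mpr ⟨c, hcinnew, rfl⟩))))
    have := ih t qa' (qb ++ new.map (fun x => ((t : Int) + 1, x.1, x.2))) (D ++ new) hInew (by
      simp only [List.length_append, List.length_cons, List.length_map] at hf hD'le ⊢
      omega)
    rw [← List.append_assoc] at this
    exact this

lemma loopA_correct (g : List (List Int)) (n m : Int) (s : Int × Int) :
    ∀ (fuel : Nat) (t : Nat) (qa qb : List (Int × Int × Int)) (D : List (Int × Int)),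
      INV g n m s t qa qb D →
      (qa ++ qb).length + 2 * (n.toNat * m.toNat - D.length) < fuel →
      specOutA g n m s (bfsLoopA g n m fuel (qa ++ qb) D) := by
  intro fuel
  induction fuel with
  | zero => intro t qa qb D _ hf; omega
  | succ fuel ih =>
    intro t qa qb D hI hf
    rcases qa with _ | ⟨e, qa'⟩
    · rcases qb with _ | ⟨e, qb'⟩
      · -- queue exhausted: no rotten orange is reachable
        obtain ⟨h1, h2, h3, h4, h5, h6, h7⟩ := hI
        simp only [List.nil_append, bfsLoopA]
        right
        refine ⟨?_, rfl⟩
        intro k hRS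
        obtain ⟨t', hs', w⟩ := hRS
        have hpass_s : pass g n m s := walk_pass_right w
        have hsD : s ∈ D := (h6 s).mpr (Or.inl ⟨0, Nat.zero_le _,
          ⟨Walk.nil s hpass_s, fun j _ => Nat.zero_le j⟩⟩)
        have hclosed : ∀ c ∈ D, ∀ x ∈ nbL c, pass g n m x → x ∈ D := by
          intro c hc
          exact (h7 c hc (by simp)).2
        have ht'D : t' ∈ D := walk_closed hclosed (walk_symm w) hsD
        exact (h7 t' ht'D (by simp)).1 hs'.2.2.2.2
      · have hI' := INV_norm hI
        have := loopA_step g n m s fuel ih (t + 1) e qb' [] D hI' (by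
          simp only [List.length_append, List.length_cons, List.length_nil] at hf ⊢
          omega)
        simpa using this
    · exact loopA_step g n m s fuel ih t e qa' qb D hI hf


lemma bfsA_spec (g : List (List Int)) (n m : Int) (s : Int × Int) (hs : pass g n m s) :
    specOutA g n m s (bfsA g n m s.1 s.2) := by
  have hN : 1 ≤ n.toNat * m.toNat := by
    obtain ⟨a1, a2, a3, a4, -⟩ := hs
    have hn : 1 ≤ n.toNat := by omega
    have hm : 1 ≤ m.toNat := by omega
    exact Nat.one_le_iff_ne_zero.mpr (Nat.mul_ne_zero (by omega) (by omega))
  have hof : (PySem.Set.ofList [(s.1, s.2)] : PySem.Set (Int × Int)) = [(s.1, s.2)] := by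
    simp [PySem.Set.ofList, PySem.Set.add]
  have hq : ([((0 : Int), s.1, s.2)] : List (Int × Int × Int)) =
      [((0 : Int), s.1, s.2)] ++ [] := by simp
  rw [show bfsA g n m s.1 s.2 = bfsLoopA g n m (2 * (n.toNat * m.toNat) + 2)
      ([((0 : Int), s.1, s.2)] ++ []) [(s.1, s.2)] by rw [← hq, bfsA, hof]]
  apply loopA_correct g n m s _ 0
  · refine ⟨?_, by simp, List.nodup_singleton _, ?_, ?_, ?_, ?_⟩
    · intro e he
      rw [List.mem_singleton] at he
      subst he
      exact ⟨by simp, ⟨Walk.nil s hs, fun j _ => Nat.zero_le j⟩⟩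
    · intro c hc
      rw [List.mem_singleton] at hc
      subst hc
      exact hs
    · intro e he
      simp only [List.append_nil, List.mem_singleton] at he
      subst he
      simp
    · intro c
      simp only [List.mem_singleton]
      constructor
      · rintro rfl
        exact Or.inl ⟨0, le_refl _, ⟨Walk.nil s hs, fun j _ => Nat.zero_le j⟩⟩
      · rintro (⟨k, hk, hd⟩ | ⟨e, he, rfl⟩)
        · interval_cases k
          exact (walk_zero_eq hd.1).symm
        · exact absurd he List.not_mem_nil
    · intro c hc hnq
      rw [List.mem_singleton] at hc
      exact absurd hc (hnq ((0 : Int), s.1, s.2) (by simp))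
  · simp only [List.append_nil, List.length_cons, List.length_nil]
    omega

lemma bfsA_eq_some {g : List (List Int)} {n m : Int} {s : Int × Int} {k : Nat}
    (hs : pass g n m s) (h : RSmin g n m s k) : bfsA g n m s.1 s.2 = (k : Int) := by
  rcases bfsA_spec g n m s hs with ⟨k', hk', heq⟩ | ⟨hnone, heq⟩
  · rw [heq, RSmin_unique h hk']
  · exact absurd h.1 (hnone k)

lemma bfsA_eq_neg {g : List (List Int)} {n m : Int} {s : Int × Int}
    (hs : pass g n m s) (h : ∀ k, ¬ RS g n m s k) : bfsA g n m s.1 s.2 = -1 := by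
  rcases bfsA_spec g n m s hs with ⟨k', hk', heq⟩ | ⟨hnone, heq⟩
  · exact absurd hk'.1 (h k')
  · exact heq


lemma nbL_comm (b : Int × Int) :
    dirs.map (fun dd => (b.1 + dd.1, b.2 + dd.2)) = nbL b := by
  simp only [nbL, dirs, List.map_cons, List.map_nil, List.cons.injEq, Prod.mk.injEq]
  refine ⟨⟨by ring, by ring⟩, ⟨by ring, by ring⟩, ⟨by ring, by ring⟩, ⟨by ring, by ring⟩, trivial⟩

lemma foldB_spec (g : List (List Int)) (n m : Int) (v : Int) (b : Int × Int) :
    ∀ (L : List (Int × Int)) (d : PySem.Dict (Int × Int) Int) (acc : List (Int × Int)),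
      ∃ added : List (Int × Int),
        (L.foldl (bodyB g n m v b) (d, acc)).2 = acc ++ added ∧
        (L.foldl (bodyB g n m v b) (d, acc)).1.keys = d.keys ++ added ∧
        (∀ x, (L.foldl (bodyB g n m v b) (d, acc)).1.get? x =
          if x ∈ added then some v else d.get? x) ∧
        added.Nodup ∧
        (∀ x ∈ added, x ∈ L.map (fun dd => (b.1 + dd.1, b.2 + dd.2)) ∧ pass g n m x ∧
          d.get? x = none) ∧
        (∀ x ∈ L.map (fun dd => (b.1 + dd.1, b.2 + dd.2)), pass g n m x →
          ((L.foldl (bodyB g n m v b) (d, acc)).1.get? x).isSome) := by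
  intro L
  induction L with
  | nil =>
    intro d acc
    exact ⟨[], by simp, by simp, by simp, by simp, by simp, by simp⟩
  | cons dd L' ih =>
    intro d acc
    rw [List.foldl_cons]
    by_cases hguard : pass g n m (b.1 + dd.1, b.2 + dd.2) ∧ d.get? (b.1 + dd.1, b.2 + dd.2) = none
    · have hbody : bodyB g n m v b (d, acc) dd =
          (d.insert (b.1 + dd.1, b.2 + dd.2) v, acc ++ [(b.1 + dd.1, b.2 + dd.2)]) := by
        simp only [bodyB]
        rw [if_pos]
        obtain ⟨⟨p1, p2, p3, p4, p5⟩, p6⟩ := hguard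
        exact ⟨p1, p2, p3, p4, p5, by rw [p6]; rfl⟩
      rw [hbody]
      obtain ⟨added', h2', hkeys', hget', hnd', hprops', hcov'⟩ :=
        ih (d.insert (b.1 + dd.1, b.2 + dd.2) v) (acc ++ [(b.1 + dd.1, b.2 + dd.2)])
      have hcontains : d.contains (b.1 + dd.1, b.2 + dd.2) = false := by
        rw [← PySem.Dict.get?_eq_none_iff_contains]
        exact hguard.2
      have hcne : (b.1 + dd.1, b.2 + dd.2) ∉ added' := by
        intro hmem
        have := (hprops' _ hmem).2.2
        rw [PySem.Dict.get?_insert_self] at this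
        exact Option.some_ne_none _ this
      refine ⟨(b.1 + dd.1, b.2 + dd.2) :: added', ?_, ?_, ?_, ?_, ?_, ?_⟩
      · rw [h2', List.append_assoc]
        rfl
      · rw [hkeys', PySem.Dict.keys_insert_of_not_contains _ _ hcontains, List.append_assoc]
        rfl
      · intro x
        rw [hget' x, PySem.Dict.get?_insert]
        by_cases hx1 : x ∈ added' <;> by_cases hx2 : x = (b.1 + dd.1, b.2 + dd.2) <;>
          simp [hx1, hx2]
      · exact List.Nodup.cons hcne hnd'
      · intro x hx
        rcases List.mem_cons.mp hx with rfl | hx'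
        · exact ⟨by rw [List.map_cons]; exact List.mem_cons_self, hguard.1, hguard.2⟩
        · obtain ⟨hm, hp, hn⟩ := hprops' x hx'
          rw [PySem.Dict.get?_insert] at hn
          refine ⟨by rw [List.map_cons]; exact List.mem_cons_of_mem _ hm, hp, ?_⟩
          by_cases hx2 : x = (b.1 + dd.1, b.2 + dd.2)
          · rw [if_pos hx2] at hn; exact absurd hn (Option.some_ne_none _)
          · rwa [if_neg hx2] at hn
      · intro x hx hpx
        rw [List.map_cons] at hx
        rcases List.mem_cons.mp hx with rfl | hx'
        · rw [hget' (b.1 + dd.1, b.2 + dd.2)]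
          by_cases hx1 : (b.1 + dd.1, b.2 + dd.2) ∈ added'
          · simp [hx1]
          · rw [if_neg hx1, PySem.Dict.get?_insert_self]; rfl
        · exact hcov' x hx' hpx
    · have hbody : bodyB g n m v b (d, acc) dd = (d, acc) := by
        simp only [bodyB]
        rw [if_neg]
        intro ⟨p1, p2, p3, p4, p5, p6⟩
        exact hguard ⟨⟨p1, p2, p3, p4, p5⟩, Option.isNone_iff_eq_none.mp p6⟩
      rw [hbody]
      obtain ⟨added', h2', hkeys', hget', hnd', hprops', hcov'⟩ := ih d acc
      refine ⟨added', h2', hkeys', hget', hnd', ?_, ?_⟩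
      · intro x hx
        obtain ⟨hm, hp, hn⟩ := hprops' x hx
        exact ⟨by rw [List.map_cons]; exact List.mem_cons_of_mem _ hm, hp, hn⟩
      · intro x hx hpx
        rw [List.map_cons] at hx
        rcases List.mem_cons.mp hx with rfl | hx'
        · rw [hget' (b.1 + dd.1, b.2 + dd.2)]
          by_cases hx1 : (b.1 + dd.1, b.2 + dd.2) ∈ added'
          · simp [hx1]
          · rw [if_neg hx1]
            have hs : d.get? (b.1 + dd.1, b.2 + dd.2) ≠ none := fun hn => hguard ⟨hpx, hn⟩
            exact Option.isSome_iff_ne_none.mpr hs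
        · exact hcov' x hx' hpx


lemma roundB_fold (g : List (List Int)) (n m : Int) (r : Nat)
    (dist : PySem.Dict (Int × Int) Int)
    (hd1 : ∀ c k, RSmin g n m c k → k ≤ r → dist.get? c = some (k : Int)) :
    ∀ (FL : List (Int × Int)) (d : PySem.Dict (Int × Int) Int) (acc : List (Int × Int)),
      (∀ b ∈ FL, RSmin g n m b r) →
      (∀ x, d.get? x = if x ∈ acc then some ((r : Int) + 1) else dist.get? x) →
      (∀ x ∈ acc, RSmin g n m x (r + 1)) →
      acc.Nodup →
      d.keys = dist.keys ++ acc →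
      (∀ x, (FL.foldl (stepCellB g n m ((r : Int) + 1)) (d, acc)).1.get? x =
        if x ∈ (FL.foldl (stepCellB g n m ((r : Int) + 1)) (d, acc)).2 then
          some ((r : Int) + 1) else dist.get? x) ∧
      (∀ x ∈ (FL.foldl (stepCellB g n m ((r : Int) + 1)) (d, acc)).2,
        RSmin g n m x (r + 1)) ∧
      (FL.foldl (stepCellB g n m ((r : Int) + 1)) (d, acc)).2.Nodup ∧
      (FL.foldl (stepCellB g n m ((r : Int) + 1)) (d, acc)).1.keys =
        dist.keys ++ (FL.foldl (stepCellB g n m ((r : Int) + 1)) (d, acc)).2 ∧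
      (∃ rest, (FL.foldl (stepCellB g n m ((r : Int) + 1)) (d, acc)).2 = acc ++ rest) ∧
      (∀ b ∈ FL, ∀ x ∈ nbL b, pass g n m x →
        ((FL.foldl (stepCellB g n m ((r : Int) + 1)) (d, acc)).1.get? x).isSome) := by
  intro FL
  induction FL with
  | nil =>
    intro d acc hFL hget hRS hnd hkeys
    exact ⟨hget, hRS, hnd, hkeys, ⟨[], by simp⟩, by simp⟩
  | cons b FL' ih =>
    intro d acc hFL hget hRS hnd hkeys
    rw [List.foldl_cons]
    have hstep : stepCellB g n m ((r : Int) + 1) (d, acc) b =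
        dirs.foldl (bodyB g n m ((r : Int) + 1) b) (d, acc) := rfl
    obtain ⟨added, hacc1, hkeys1, hget1, hnd1, hprops1, hcov1⟩ :=
      foldB_spec g n m ((r : Int) + 1) b dirs d acc
    have hb : RSmin g n m b r := hFL b List.mem_cons_self
    -- added cells are exactly new level-(r+1) cells
    have haddRS : ∀ x ∈ added, RSmin g n m x (r + 1) := by
      intro x hx
      obtain ⟨hmapmem, hpx, hnone⟩ := hprops1 x hx
      rw [nbL_comm b] at hmapmem
      have hdistnone : dist.get? x = none := by
        have := hget x
        rw [hnone] at this
        by_cases hxacc : x ∈ acc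
        · rw [if_pos hxacc] at this; exact absurd this.symm (Option.some_ne_none _)
        · rw [if_neg hxacc] at this; exact this.symm
      obtain ⟨t0, hs0, hw0⟩ := hb.1
      have hRSx : RS g n m x (r + 1) := ⟨t0, hs0, Walk.snoc x hw0 hmapmem hpx⟩
      refine ⟨hRSx, ?_⟩
      intro j hj
      obtain ⟨j0, hj0, hj0min⟩ := nat_exists_min (P := fun j => RS g n m x j) hj
      have : ¬ j0 ≤ r := by
        intro hle
        have := hd1 x j0 ⟨hj0, hj0min⟩ hle
        rw [hdistnone] at this
        exact Option.some_ne_none _ this.symm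
      have := hj0min _ hj
      omega
    have haccadd : ∀ x ∈ acc ++ added, RSmin g n m x (r + 1) := by
      intro x hx
      rcases List.mem_append.mp hx with h | h
      · exact hRS x h
      · exact haddRS x h
    have hndaa : (acc ++ added).Nodup := by
      rw [List.nodup_append]
      refine ⟨hnd, hnd1, ?_⟩
      intro a ha b' hb' hab
      obtain ⟨-, -, hnone⟩ := hprops1 b' hb'
      have := hget b'
      rw [hnone, if_pos (hab ▸ ha)] at this
      exact Option.some_ne_none _ this.symm
    have hgetaa : ∀ x, (dirs.foldl (bodyB g n m ((r : Int) + 1) b) (d, acc)).1.get? x =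
        if x ∈ acc ++ added then some ((r : Int) + 1) else dist.get? x := by
      intro x
      rw [hget1 x]
      by_cases hx1 : x ∈ added
      · rw [if_pos hx1, if_pos (List.mem_append_right _ hx1)]
      · rw [if_neg hx1, hget x]
        by_cases hx2 : x ∈ acc
        · rw [if_pos hx2, if_pos (List.mem_append_left _ hx2)]
        · rw [if_neg hx2, if_neg (by
            intro hc
            rcases List.mem_append.mp hc with h | h
            · exact hx2 h
            · exact hx1 h)]
    have hkeysaa : (dirs.foldl (bodyB g n m ((r : Int) + 1) b) (d, acc)).1.keys =
        dist.keys ++ (acc ++ added) := by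
      rw [hkeys1, hkeys, List.append_assoc]
    -- rewrite the state as a pair to apply the IH
    have hstate : dirs.foldl (bodyB g n m ((r : Int) + 1) b) (d, acc) =
        ((dirs.foldl (bodyB g n m ((r : Int) + 1) b) (d, acc)).1, acc ++ added) := by
      rw [← hacc1]
    rw [hstep, hstate]
    obtain ⟨ihget, ihRS, ihnd, ihkeys, ⟨rest, hrest⟩, ihcov⟩ :=
      ih ((dirs.foldl (bodyB g n m ((r : Int) + 1) b) (d, acc)).1) (acc ++ added)
        (fun b' hb' => hFL b' (List.mem_cons_of_mem _ hb'))
        hgetaa haccadd hndaa hkeysaa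
    refine ⟨ihget, ihRS, ihnd, ihkeys, ⟨added ++ rest, by rw [hrest, List.append_assoc]⟩, ?_⟩
    intro b' hb' x hx hpx
    rcases List.mem_cons.mp hb' with rfl | hb''
    · -- b itself: its passable neighbours are already some in the per-cell state, and stay some
      have h1 := hcov1 x (by rwa [nbL_comm b']) hpx
      rw [hget1 x] at h1
      rw [ihget x]
      by_cases hxF : x ∈ (List.foldl (stepCellB g n m ((r : Int) + 1))
          ((dirs.foldl (bodyB g n m ((r : Int) + 1) b') (d, acc)).1, acc ++ added) FL').2
      · rw [if_pos hxF]; rfl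
      · rw [if_neg hxF]
        by_cases hx1 : x ∈ added
        · exact absurd (hrest ▸ List.mem_append_left _ (List.mem_append_right _ hx1)) hxF
        · rw [if_neg hx1] at h1
          have := hget x
          by_cases hx2 : x ∈ acc
          · exact absurd (hrest ▸ List.mem_append_left _ (List.mem_append_left _ hx2)) hxF
          · rw [if_neg hx2] at this
            rw [← this]
            exact h1
    · exact ihcov b' hb'' x hx hpx


def PBspec (g : List (List Int)) (n m : Int) (dist : PySem.Dict (Int × Int) Int) : Prop :=
  (∀ c k, RSmin g n m c k → dist.get? c = some (k : Int)) ∧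
  (∀ c v, dist.get? c = some v → ∃ k, RSmin g n m c k ∧ v = (k : Int))

lemma PB_of_level_empty {g : List (List Int)} {n m : Int} {r : Nat}
    {dist : PySem.Dict (Int × Int) Int}
    (h1 : ∀ c k, RSmin g n m c k → k ≤ r → dist.get? c = some (k : Int))
    (h2 : ∀ c v, dist.get? c = some v → ∃ k ≤ r, RSmin g n m c k ∧ v = (k : Int))
    (hempty : ∀ c, ¬ RSmin g n m c r) : PBspec g n m dist := by
  constructor
  · intro c k hk
    by_cases hle : k ≤ r
    · exact h1 c k hk hle
    · obtain ⟨b, hb⟩ := RSmin_exists_level hk r (by omega)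
      exact absurd hb (hempty b)
  · intro c v hv
    obtain ⟨k, -, hk, rfl⟩ := h2 c v hv
    exact ⟨k, hk, rfl⟩

lemma dict_size_eq_keys_length {κ ν : Type} [BEq κ] (d : PySem.Dict κ ν) :
    d.size = d.keys.length := by
  simp [PySem.Dict.keys, PySem.Dict.size]

lemma loopB_correct (g : List (List Int)) (n m : Int) :
    ∀ (fuel : Nat) (r : Nat) (dist : PySem.Dict (Int × Int) Int)
      (frontier : List (Int × Int)),
      (∀ c k, RSmin g n m c k → k ≤ r → dist.get? c = some (k : Int)) →
      (∀ c v, dist.get? c = some v → ∃ k ≤ r, RSmin g n m c k ∧ v = (k : Int)) →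
      (∀ c, c ∈ frontier ↔ RSmin g n m c r) →
      frontier.Nodup →
      dist.keys.Nodup →
      (∀ c ∈ dist.keys, pass g n m c) →
      (frontier ≠ [] → n.toNat * m.toNat + 2 ≤ dist.size + fuel) →
      PBspec g n m (loopB g n m fuel (r : Int) dist frontier) := by
  intro fuel
  induction fuel with
  | zero =>
    intro r dist frontier h1 h2 h3 h4 h5 h6 hfuel
    have hsize : dist.size ≤ n.toNat * m.toNat := by
      rw [dict_size_eq_keys_length]
      exact card_bound h5 (fun c hc => pass_bounds (h6 c hc))
    have hfr : frontier = [] := by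
      by_contra hne
      have := hfuel hne
      omega
    subst hfr
    exact PB_of_level_empty h1 h2 (fun c hc => List.not_mem_nil ((h3 c).mpr hc))
  | succ fuel ih =>
    intro r dist frontier h1 h2 h3 h4 h5 h6 hfuel
    rcases frontier with _ | ⟨hd, tl⟩
    · simp only [loopB]
      exact PB_of_level_empty h1 h2 (fun c hc => List.not_mem_nil ((h3 c).mpr hc))
    · simp only [loopB]
      obtain ⟨Fget, FRS, Fnd, Fkeys, ⟨rest, hrest⟩, Fcov⟩ :=
        roundB_fold g n m r dist h1 (hd :: tl) dist []
          (fun b hb => (h3 b).mp hb) (by simp) (by simp) List.nodup_nil (by simp)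
      have hcast : ((r + 1 : Nat) : Int) = (r : Int) + 1 := by push_cast; ring
      -- names for the round result
      set F := (hd :: tl).foldl (stepCellB g n m ((r : Int) + 1)) (dist, []) with hF
      -- new level-(r+1) invariants
      have h1' : ∀ c k, RSmin g n m c k → k ≤ r + 1 → F.1.get? c = some (k : Int) := by
        intro c k hk hkle
        by_cases hle : k ≤ r
        · rw [Fget c, if_neg]
          · exact h1 c k hk hle
          · intro hcF
            have := RSmin_unique hk (FRS c hcF)
            omega
        · have hkr : k = r + 1 := by omega
          subst hkr
          obtain ⟨b, hbr, hnb, hpc⟩ := RSmin_descend hk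
          have hbf : b ∈ hd :: tl := (h3 b).mpr hbr
          have hsome := Fcov b hbf c hnb hpc
          rw [Fget c] at hsome ⊢
          by_cases hcF : c ∈ F.2
          · rw [if_pos hcF]
            rw [hcast]
          · rw [if_neg hcF] at hsome
            obtain ⟨v, hv⟩ := Option.isSome_iff_exists.mp hsome
            obtain ⟨k', hk'le, hk', -⟩ := h2 c v hv
            have := RSmin_unique hk hk'
            omega
      have h2' : ∀ c v, F.1.get? c = some v → ∃ k ≤ r + 1, RSmin g n m c k ∧ v = (k : Int) := by
        intro c v hv
        rw [Fget c] at hv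
        by_cases hcF : c ∈ F.2
        · rw [if_pos hcF] at hv
          exact ⟨r + 1, le_refl _, FRS c hcF, by rw [hcast]; exact (Option.some.inj hv).symm⟩
        · rw [if_neg hcF] at hv
          obtain ⟨k, hkle, hk, rfl⟩ := h2 c v hv
          exact ⟨k, by omega, hk, rfl⟩
      have h3' : ∀ c, c ∈ F.2 ↔ RSmin g n m c (r + 1) := by
        intro c
        refine ⟨FRS c, ?_⟩
        intro hR
        have := h1' c (r + 1) hR (le_refl _)
        rw [Fget c] at this
        by_cases hcF : c ∈ F.2
        · exact hcF
        · rw [if_neg hcF] at this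
          obtain ⟨k', hk'le, hk', hveq⟩ := h2 c _ this
          have : k' = r + 1 := by exact_mod_cast hveq.symm
          omega
      have hdisj : ∀ x ∈ dist.keys, x ∉ F.2 := by
        intro x hx hxF
        have hc : dist.contains x = true := (PySem.Dict.contains_iff_mem_keys _ _).mpr hx
        have hne : dist.get? x ≠ none := by
          intro hnone
          rw [PySem.Dict.get?_eq_none_iff_contains] at hnone
          rw [hc] at hnone
          simp at hnone
        obtain ⟨v, hv⟩ := Option.ne_none_iff_exists'.mp hne
        obtain ⟨k, hkle, hk, -⟩ := h2 x v hv
        have := RSmin_unique hk (FRS x hxF)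
        omega
      have h5' : F.1.keys.Nodup := by
        rw [Fkeys, List.nodup_append]
        exact ⟨h5, Fnd, fun a ha b hb hab => hdisj a ha (hab ▸ hb)⟩
      have h6' : ∀ c ∈ F.1.keys, pass g n m c := by
        intro c hc
        rw [Fkeys] at hc
        rcases List.mem_append.mp hc with h | h
        · exact h6 c h
        · obtain ⟨t0, -, w⟩ := (FRS c h).1
          exact walk_pass_right w
      have hsizeF : F.1.size = dist.size + F.2.length := by
        rw [dict_size_eq_keys_length, dict_size_eq_keys_length, Fkeys, List.length_append]
      have hfuel' : F.2 ≠ [] → n.toNat * m.toNat + 2 ≤ F.1.size + fuel := by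
        intro hne
        have := hfuel (by simp)
        have hlen : 1 ≤ F.2.length := List.length_pos_iff.mpr hne
        omega
      have := ih (r + 1) F.1 F.2 h1' h2' h3' Fnd h5' h6' hfuel'
      rwa [hcast] at this


lemma initB_inner_get? (g : List (List Int)) (i : Int) (c : Int × Int) :
    ∀ (js : List Int) (d : PySem.Dict (Int × Int) Int),
      ((js.foldl (fun d j => if cellv g i j = 2 then d.insert (i, j) 0 else d) d).get? c) =
        if c.1 = i ∧ c.2 ∈ js ∧ cellv g i c.2 = 2 then some 0 else d.get? c := by
  intro js
  induction js with
  | nil => intro d; simp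
  | cons j js' ih =>
    intro d
    rw [List.foldl_cons]
    by_cases hj2 : cellv g i j = 2
    · rw [if_pos hj2, ih, PySem.Dict.get?_insert]
      by_cases hA : c.1 = i ∧ c.2 ∈ js' ∧ cellv g i c.2 = 2
      · rw [if_pos hA, if_pos ⟨hA.1, List.mem_cons_of_mem _ hA.2.1, hA.2.2⟩]
      · rw [if_neg hA]
        by_cases hc : c = (i, j)
        · rw [if_pos hc, if_pos ⟨by rw [hc], List.mem_cons.mpr (Or.inl (by rw [hc])),
            by rw [hc]; exact hj2⟩]
        · rw [if_neg hc, if_neg (by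
            rintro ⟨h1, h2, h3⟩
            rcases List.mem_cons.mp h2 with h | h
            · exact hc (Prod.ext_iff.mpr ⟨h1, h⟩)
            · exact hA ⟨h1, h, h3⟩)]
    · rw [if_neg hj2, ih]
      by_cases hA : c.1 = i ∧ c.2 ∈ j :: js' ∧ cellv g i c.2 = 2
      · rw [if_pos hA]
        obtain ⟨h1, h2, h3⟩ := hA
        rcases List.mem_cons.mp h2 with h | h
        · exact absurd (by rw [← h]; exact h3) hj2
        · rw [if_pos ⟨h1, h, h3⟩]
      · rw [if_neg hA, if_neg (fun h => hA ⟨h.1, List.mem_cons_of_mem _ h.2.1, h.2.2⟩)]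

lemma initB_outer_get? (g : List (List Int)) (m : Int) (c : Int × Int) :
    ∀ (is : List Int) (d : PySem.Dict (Int × Int) Int),
      ((is.foldl (fun d i =>
          (PySem.List.pyRange 0 m 1).foldl
            (fun d j => if cellv g i j = 2 then d.insert (i, j) 0 else d) d) d).get? c) =
        if c.1 ∈ is ∧ 0 ≤ c.2 ∧ c.2 < m ∧ cellv g c.1 c.2 = 2 then some 0 else d.get? c := by
  intro is
  induction is with
  | nil => intro d; simp
  | cons i is' ih =>
    intro d
    rw [List.foldl_cons, ih]
    by_cases hA : c.1 ∈ is' ∧ 0 ≤ c.2 ∧ c.2 < m ∧ cellv g c.1 c.2 = 2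
    · rw [if_pos hA, if_pos ⟨List.mem_cons_of_mem _ hA.1, hA.2⟩]
    · rw [if_neg hA, initB_inner_get?]
      by_cases hB : c.1 = i ∧ c.2 ∈ PySem.List.pyRange 0 m 1 ∧ cellv g i c.2 = 2
      · rw [if_pos hB]
        have hmem := (PySem.List.mem_pyRange_one).mp hB.2.1
        rw [if_pos ⟨List.mem_cons.mpr (Or.inl hB.1), hmem.1, hmem.2, by rw [hB.1]; exact hB.2.2⟩]
      · rw [if_neg hB, if_neg (by
          rintro ⟨hc1, hc2, hc3, hc4⟩
          rcases List.mem_cons.mp hc1 with h | h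
          · exact hB ⟨h, (PySem.List.mem_pyRange_one).mpr ⟨hc2, hc3⟩, by rw [← h]; exact hc4⟩
          · exact hA ⟨h, hc2, hc3, hc4⟩)]

lemma initB_get?_pos (g : List (List Int)) (n m : Int) (c : Int × Int)
    (hs : src g n m c) : (initB g n m).get? c = some 0 := by
  rw [initB, initB_outer_get?]
  obtain ⟨h1, h2, h3, h4, h5⟩ := hs
  rw [if_pos ⟨(PySem.List.mem_pyRange_one).mpr ⟨h1, h2⟩, h3, h4, h5⟩]

lemma initB_get?_neg (g : List (List Int)) (n m : Int) (c : Int × Int)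
    (hs : ¬ src g n m c) : (initB g n m).get? c = none := by
  rw [initB, initB_outer_get?]
  rw [if_neg (by
    rintro ⟨hc1, hc2, hc3, hc4⟩
    have := (PySem.List.mem_pyRange_one).mp hc1
    exact hs ⟨this.1, this.2, hc2, hc3, hc4⟩), PySem.Dict.get?_empty]

lemma nodup_keys_fold {α : Type} (F : PySem.Dict (Int × Int) Int → α → PySem.Dict (Int × Int) Int)
    (h : ∀ d x, d.keys.Nodup → (F d x).keys.Nodup) :
    ∀ (l : List α) (d : PySem.Dict (Int × Int) Int), d.keys.Nodup → (l.foldl F d).keys.Nodup := by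
  intro l
  induction l with
  | nil => intro d hd; exact hd
  | cons x l' ih => intro d hd; exact ih (F d x) (h d x hd)

lemma initB_keys_nodup (g : List (List Int)) (n m : Int) : (initB g n m).keys.Nodup := by
  rw [initB]
  apply nodup_keys_fold
  · intro d i hd
    apply nodup_keys_fold
    · intro d' j hd'
      by_cases hj : cellv g i j = 2
      · rw [if_pos hj]; exact PySem.Dict.nodup_keys_insert _ _ _ hd'
      · rwa [if_neg hj]
    · exact hd
  · exact PySem.Dict.nodup_keys_empty

lemma dist_final_PB (g : List (List Int)) (n m : Int) :
    PBspec g n m (loopB g n m (n.toNat * m.toNat + 2) 0 (initB g n m) (initB g n m).keys) := by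
  have hkey_iff : ∀ c, c ∈ (initB g n m).keys ↔ src g n m c := by
    intro c
    rw [← PySem.Dict.contains_iff_mem_keys]
    constructor
    · intro hc
      by_contra hs
      have : (initB g n m).get? c = none := initB_get?_neg g n m c hs
      rw [PySem.Dict.get?_eq_none_iff_contains] at this
      rw [hc] at this
      simp at this
    · intro hs
      by_contra hc
      have hcf : (initB g n m).contains c = false := by
        cases h : (initB g n m).contains c
        · rfl
        · exact absurd h hc
      have := (PySem.Dict.get?_eq_none_iff_contains _ _).mpr hcf
      rw [initB_get?_pos g n m c hs] at this
      exact Option.some_ne_none _ this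
  have h0 : ((0 : Nat) : Int) = (0 : Int) := rfl
  rw [← h0]
  apply loopB_correct g n m _ 0
  · intro c k hk hkle
    interval_cases k
    rw [initB_get?_pos g n m c (RSmin_zero_iff.mp hk)]
    rfl
  · intro c v hv
    by_cases hs : src g n m c
    · rw [initB_get?_pos g n m c hs] at hv
      exact ⟨0, le_refl _, RSmin_zero_iff.mpr hs, by rw [← Option.some.inj hv]; rfl⟩
    · rw [initB_get?_neg g n m c hs] at hv
      exact absurd hv.symm (Option.some_ne_none _)
  · intro c
    rw [hkey_iff c, RSmin_zero_iff]
  · exact initB_keys_nodup g n m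
  · exact initB_keys_nodup g n m
  · intro c hc
    exact pass_of_src ((hkey_iff c).mp hc)
  · intro _
    omega

lemma inner_eq (g : List (List Int)) (n m : Int) (dist : PySem.Dict (Int × Int) Int)
    (hPB : PBspec g n m dist) (i : Int) (hi : 0 ≤ i ∧ i < n) :
    ∀ (js : List Int) (ans : Int), (∀ j ∈ js, 0 ≤ j ∧ j < m) →
      innerA g n m i js ans = innerB g dist i js ans := by
  intro js
  induction js with
  | nil => intro ans _; rfl
  | cons j js' ih =>
    intro ans hjs
    obtain ⟨hj1, hj2⟩ := hjs j List.mem_cons_self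
    simp only [innerA, innerB]
    by_cases hcell : cellv g i j = 1
    · rw [if_pos hcell, if_pos hcell]
      have hpass : pass g n m (i, j) := ⟨hi.1, hi.2, hj1, hj2, by rw [hcell]; decide⟩
      by_cases hex : ∃ k0, RS g n m (i, j) k0
      · obtain ⟨k0, hk0⟩ := hex
        obtain ⟨k, hk, hkmin⟩ := nat_exists_min (P := fun k => RS g n m (i, j) k) hk0
        have hmin : RSmin g n m (i, j) k := ⟨hk, hkmin⟩
        rw [show bfsA g n m i j = (k : Int) from bfsA_eq_some hpass hmin,
          hPB.1 (i, j) k hmin]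
        rw [if_neg (by omega)]
        exact ih (max ans (k : Int)) (fun j' hj' => hjs j' (List.mem_cons_of_mem _ hj'))
      · have hall : ∀ k, ¬ RS g n m (i, j) k := fun k hk => hex ⟨k, hk⟩
        rw [show bfsA g n m i j = -1 from bfsA_eq_neg hpass hall]
        rw [if_pos rfl]
        have hnone : dist.get? (i, j) = none := by
          cases h : dist.get? (i, j)
          · rfl
          · obtain ⟨k, hk, -⟩ := hPB.2 (i, j) _ h
            exact absurd hk.1 (hall k)
        rw [hnone]
    · rw [if_neg hcell, if_neg hcell]
      exact ih ans (fun j' hj' => hjs j' (List.mem_cons_of_mem _ hj'))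

lemma outer_eq (g : List (List Int)) (n m : Int) (dist : PySem.Dict (Int × Int) Int)
    (hPB : PBspec g n m dist) :
    ∀ (is : List Int) (ans : Int), (∀ i ∈ is, 0 ≤ i ∧ i < n) →
      outerA g n m is ans = outerB g dist m is ans := by
  intro is
  induction is with
  | nil => intro ans _; rfl
  | cons i is' ih =>
    intro ans his
    simp only [outerA, outerB]
    rw [← inner_eq g n m dist hPB i (his i List.mem_cons_self) (PySem.List.pyRange 0 m 1) ans
      (fun j hj => (PySem.List.mem_pyRange_one).mp hj)]
    cases h : innerA g n m i (PySem.List.pyRange 0 m 1) ans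
    · rfl
    · exact ih _ (fun i' hi' => his i' (List.mem_cons_of_mem _ hi'))

theorem f_spec : Claim_equal_f := by
  intro grid _ _
  show f grid = f_alt grid
  simp only [f, f_alt]
  rw [outer_eq grid _ _ _ (dist_final_PB grid _ _) _ 0
    (fun i hi => (PySem.List.mem_pyRange_one).mp hi)]
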